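-- pv_equiv track=rewrite | github.com/jesopo/scpl | scpl/common.py | find_unescaped
-- ===== SOURCE A (Python) =====
-- from typing      import Iterator, List, Optional, Sequence
--
-- def find_unescaped(
--         s: str,
--         c: str
--         ) -> Iterator[int]:
--
--     i = 0
--
--     while i < len(s):
--         c2 = s[i]
--         if c2 == "\\":
--             i += 1
--         elif c2 == c:
--             yield i
--         i += 1
-- ===== SOURCE B (Python) =====
-- def find_unescaped(s, c):
--     # Stateless characterization: an occurrence of c at i is unescaped iff it is
--     # not itself a backslash and the maximal run of backslashes immediately
--     # before i has even length.  Pass 1 collects candidate positions, pass 2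
--     # filters them by the parity of the preceding backslash run.
--     matches = [i for i, ch in enumerate(s) if ch == c and ch != "\\"]
--     for i in matches:
--         j = i
--         while j > 0 and s[j - 1] == "\\":
--             j -= 1
--         if (i - j) % 2 == 0:
--             yield i
-- ===== Notes on version B (the rewrite author's own statement) =====
-- stated objective: alternative
-- what changed: Replaces A's stateful skip-ahead scan (i += 2 after a backslash) by a stateless two-pass rule: first collect all non-backslash occurrences of c, then keep exactly those whose immediately preceding maximal backslash run has even length.
import Mathlib
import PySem

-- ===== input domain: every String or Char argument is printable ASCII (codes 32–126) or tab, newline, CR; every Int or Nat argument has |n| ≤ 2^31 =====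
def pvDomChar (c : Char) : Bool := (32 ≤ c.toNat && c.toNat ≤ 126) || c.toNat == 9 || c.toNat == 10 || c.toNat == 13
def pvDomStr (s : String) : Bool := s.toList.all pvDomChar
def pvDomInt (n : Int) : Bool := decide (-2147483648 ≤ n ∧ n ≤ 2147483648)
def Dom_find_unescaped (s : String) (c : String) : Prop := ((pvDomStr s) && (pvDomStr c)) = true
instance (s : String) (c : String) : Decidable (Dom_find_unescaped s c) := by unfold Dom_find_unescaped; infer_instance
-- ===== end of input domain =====

-- B replaces A's skip-ahead scan by a stateless two-pass rule (collect ms, keep those whose preceding backslash run is even); alternative decomposition, same asymptotic cost.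

-- ===== PORT A =====
-- A's while-loop walks the string by index: on a backslash it does i += 1 and the
-- trailing i += 1 skips the next character; on a match it yields i.  Transcribed as
-- recursion on the remaining characters, keeping the absolute index i.
def findUnescapedGoA (cs : List Char) (c : String) (i : Int) : List Int :=
  match cs with
  | [] => []
  | ch :: rest =>
    if ch = '\\' then
      findUnescapedGoA (rest.drop 1) c (i + 2)
    else if String.ofList [ch] = c then
      i :: findUnescapedGoA rest c (i + 1)
    else
      findUnescapedGoA rest c (i + 1)
termination_by cs.length
decreasing_by
  all_goals simp

def find_unescaped (s : String) (c : String) : List Int :=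
  findUnescapedGoA s.toList c 0

-- ===== PORT B =====
-- B's inner backward while-loop: start of the maximal backslash run ending just before j.
def runStart (cs : List Char) : Nat → Nat
  | 0 => 0
  | j + 1 => if cs[j]? = some '\\' then runStart cs j else j + 1

-- B: pass 1 collects candidate positions (the comprehension), pass 2 keeps those
-- whose preceding backslash run has even length.
def find_unescaped_alt (s : String) (c : String) : List Int :=
  let cs := s.toList
  let ms := (PySem.List.enumerate cs).filterMap
    (fun p => if String.ofList [p.2] = c ∧ p.2 ≠ '\\' then some p.1 else none)
  ms.filter (fun i => (i - (runStart cs i.toNat : Int)) % 2 == 0)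

-- ===== PRECONDITION & SPEC =====
def Spec_find_unescaped (s : String) (c : String) (out : List Int) : Prop := out = find_unescaped_alt s c
instance (s : String) (c : String) (out : List Int) : Decidable (Spec_find_unescaped s c out) := by unfold Spec_find_unescaped; infer_instance

-- ===== CLAIM (what is proved, stated in full; the proofs are below) =====
def Claim_equal_find_unescaped : Prop := ∀ (s : String) (c : String), Dom_find_unescaped s c → Spec_find_unescaped s c (find_unescaped s c)

-- ===== LEMMAS AND PROOFS =====

-- Proof-only intermediate: a forward scan carrying `par` = "the maximal backslash
-- run ending just before the current position has even length".
def specGo (cs : List Char) (c : String) (i : Int) (par : Bool) : List Int :=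
  match cs with
  | [] => []
  | ch :: rest =>
    if ch = '\\' then specGo rest c (i + 1) (!par)
    else if par ∧ String.ofList [ch] = c then i :: specGo rest c (i + 1) true
    else specGo rest c (i + 1) true

theorem goA_eq_specGo (n : Nat) :
    ∀ (cs : List Char) (c : String) (i : Int), cs.length ≤ n →
      findUnescapedGoA cs c i = specGo cs c i true := by
  induction n with
  | zero =>
    intro cs c i h
    have : cs = [] := List.eq_nil_of_length_eq_zero (Nat.le_zero.mp h)
    subst this; simp [findUnescapedGoA, specGo]
  | succ n ih =>
    intro cs c i h
    match cs with
    | [] => simp [findUnescapedGoA, specGo]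
    | ch :: rest =>
      by_cases hb : ch = '\\'
      · subst hb
        match rest with
        | [] => simp [findUnescapedGoA, specGo]
        | r :: rr =>
          rw [findUnescapedGoA]
          simp only [if_pos rfl, List.drop_succ_cons, List.drop_zero, specGo]
          by_cases hr : r = '\\'
          · subst hr
            simp only [if_pos rfl, specGo]
            have hlen : rr.length ≤ n := by simp at h; omega
            have := ih rr c (i + 1 + 1) hlen
            simpa [add_assoc] using this
          · simp only [if_neg hr, Bool.not_true, false_and, if_false]
            have hlen : rr.length ≤ n := by simp at h; omega
            have := ih rr c (i + 1 + 1) hlen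
            simpa [add_assoc] using this
      · rw [findUnescapedGoA]
        simp only [specGo, if_neg hb, true_and]
        have hlen : rest.length ≤ n := by simp at h; omega
        rw [ih rest c (i + 1) hlen]

-- The suffix form of B: candidates from position k on (with absolute indices),
-- filtered by the even-run test against the FULL list.
def bSuf (full : List Char) (c : String) (k : Nat) : List Int :=
  ((PySem.List.enumerate (full.drop k) (k : Int)).filterMap
      (fun p => if String.ofList [p.2] = c ∧ p.2 ≠ '\\' then some p.1 else none)).filter
    (fun i => (i - (runStart full i.toNat : Int)) % 2 == 0)

theorem runStart_le (cs : List Char) (k : Nat) : runStart cs k ≤ k := by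
  induction k with
  | zero => simp [runStart]
  | succ j ih =>
    rw [runStart]
    split
    · omega
    · omega

theorem specGo_eq_bSuf (c : String) :
    ∀ (cs : List Char) (full : List Char) (k : Nat), full.drop k = cs →
      specGo cs c (k : Int) (((k : Int) - (runStart full k : Int)) % 2 == 0) = bSuf full c k := by
  intro cs
  induction cs with
  | nil =>
    intro full k hdrop
    simp [specGo, bSuf, hdrop, PySem.List.enumerate]
  | cons ch rest ih =>
    intro full k hdrop
    have hget : full[k]? = some ch := by
      have h0 : (full.drop k)[0]? = full[k + 0]? := List.getElem?_drop
      rw [hdrop] at h0; simpa using h0.symm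
    have hdrop' : full.drop (k + 1) = rest := by
      have h1 := congrArg (List.drop 1) hdrop
      simp only [List.drop_drop] at h1
      simpa [Nat.add_comm] using h1
    have htail := ih full (k + 1) hdrop'
    have hle := runStart_le full k
    by_cases hb : ch = '\\'
    · subst hb
      have hrun : runStart full (k + 1) = runStart full k := by
        rw [runStart, if_pos hget]
      have hpar : (((k : Int) + 1 - (runStart full (k + 1) : Int)) % 2 == 0)
          = !(((k : Int) - (runStart full k : Int)) % 2 == 0) := by
        rw [hrun]
        rcases Int.even_or_odd ((k : Int) - (runStart full k : Int)) with ⟨m, hm⟩ | ⟨m, hm⟩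
        · have h1 : ((k : Int) - (runStart full k : Int)) % 2 = 0 := by omega
          have h2 : ((k : Int) + 1 - (runStart full k : Int)) % 2 = 1 := by omega
          simp [h1, h2]
        · have h1 : ((k : Int) - (runStart full k : Int)) % 2 = 1 := by omega
          have h2 : ((k : Int) + 1 - (runStart full k : Int)) % 2 = 0 := by omega
          simp [h1, h2]
      push_cast at htail
      rw [hpar] at htail
      simp only [specGo, if_pos rfl]
      rw [htail]
      unfold bSuf
      rw [hdrop, hdrop', PySem.List.enumerate_cons]
      push_cast
      simp
    · have hrun1 : runStart full (k + 1) = k + 1 := by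
        rw [runStart, if_neg]; rw [hget]; simp [hb]
      have hpar1 : (((k : Int) + 1 - (runStart full (k + 1) : Int)) % 2 == 0) = true := by
        rw [hrun1]; push_cast; simp
      push_cast at htail
      rw [hpar1] at htail
      simp only [specGo, if_neg hb]
      rw [htail]
      unfold bSuf
      rw [hdrop, hdrop', PySem.List.enumerate_cons]
      push_cast
      by_cases hc : String.ofList [ch] = c
      · simp only [List.filterMap_cons, if_pos (⟨hc, hb⟩ : String.ofList [ch] = c ∧ ch ≠ '\\'),
          List.filter_cons]
        by_cases hp : (((k : Int) - (runStart full k : Int)) % 2 == 0) = true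
        · rw [if_pos (by simp [hp, hc]), if_pos (by simpa [Int.toNat_natCast] using hp)]
        · rw [if_neg (by simp at hp; simp [hp]), if_neg (by simpa [Int.toNat_natCast] using hp)]
      · simp only [List.filterMap_cons,
          if_neg (by simp [hc] : ¬(String.ofList [ch] = c ∧ ch ≠ '\\'))]
        rw [if_neg (by simp [hc])]

-- ===== VERDICT (by name: the statement is the Claim_ definition above) =====
theorem find_unescaped_spec : Claim_equal_find_unescaped := by
  intro s c _
  unfold Spec_find_unescaped find_unescaped find_unescaped_alt
  rw [goA_eq_specGo s.toList.length s.toList c 0 le_rfl]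
  have h := specGo_eq_bSuf c s.toList s.toList 0 (by simp)
  norm_num [runStart] at h
  rw [h]
  simp [bSuf, PySem.List.enumerate]
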